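-- pv_equiv track=rewrite | github.com/KimHyungkeun/Algorithm | Programmers/Python/2021/모든문제/짝지어제거하기_2017팁스타운.py | solution
-- ===== SOURCE A (Python) =====
-- def solution(s):
--     answer = 0
--     stack = []
--
--     for w in s :
--         # 스택이 비어있다면 스택에 새로 추가
--         if not stack :
--             stack.append(w)
--
--         else :
--             # 스택의 top부분과 다음에 들어올 철자 w가 같다면, 스택의 top을 제거
--             if stack[-1] == w :
--                 stack.pop()
--             # 그렇지 않다면 새로 추가함
--             else :
--                 stack.append(w)
--
--     # 스택이 완전히 비었다면(문자열이 완전히 제거되었다면) 1을 반환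
--     if not stack :
--         answer = 1
--
--     # 값 반환
--     return answer
-- ===== SOURCE B (Python) =====
-- def solution(s):
--     chars = list(s)
--     found = True
--     while found:
--         found = False
--         for i in range(len(chars) - 1):
--             if chars[i] == chars[i + 1]:
--                 del chars[i:i + 2]
--                 found = True
--                 break
--     return 1 if not chars else 0
-- ===== Notes on version B (the rewrite author's own statement) =====
-- stated objective: alternative
-- what changed: Replaced A's single-pass stack reduction by a fixpoint rewrite loop that repeatedly finds the first adjacent equal pair and splices it out until no pair remains, checking emptiness at the end (equal by confluence of pair cancellation).
import Mathlib
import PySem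

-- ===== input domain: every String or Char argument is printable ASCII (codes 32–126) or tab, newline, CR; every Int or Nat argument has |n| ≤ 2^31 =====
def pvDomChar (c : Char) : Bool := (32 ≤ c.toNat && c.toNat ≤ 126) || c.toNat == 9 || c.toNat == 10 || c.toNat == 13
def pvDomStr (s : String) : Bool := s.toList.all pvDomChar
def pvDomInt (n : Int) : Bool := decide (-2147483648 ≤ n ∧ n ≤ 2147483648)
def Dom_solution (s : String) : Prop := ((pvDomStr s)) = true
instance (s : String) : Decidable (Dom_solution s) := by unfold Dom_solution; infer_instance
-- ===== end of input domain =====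

-- B replaces A's one-pass stack reduction by a fixpoint rewrite loop (splice out the first
-- adjacent equal pair, restart, until none remains); same result by confluence of cancellation.

-- ===== PORT A =====
-- Python's stack list, appended at the end; stack[-1] is the last element, pop() drops it.
def stepA (stack : List Char) (w : Char) : List Char :=
  if stack = [] then stack ++ [w]
  else if stack.getLast? = some w then stack.dropLast
  else stack ++ [w]

def solution (s : String) : Int :=
  let stack := s.toList.foldl stepA []
  if stack = [] then 1 else 0

-- ===== PORT B =====
-- one scan of Source B's inner `for` loop: first adjacent equal pair spliced out, none if no pair
def findPair : List Char → Option (List Char)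
  | [] => none
  | [_] => none
  | a :: b :: t => if a = b then some t else (findPair (b :: t)).map (a :: ·)

theorem findPair_length : ∀ {l t : List Char}, findPair l = some t → t.length + 2 = l.length := by
  intro l
  induction l with
  | nil => intro t h; simp [findPair] at h
  | cons a l ih =>
    intro t h
    match l, h with
    | [], h => simp [findPair] at h
    | b :: t', h =>
      simp only [findPair] at h
      split at h
      · simp_all
      · cases hf : findPair (b :: t') with
        | none => simp [hf] at h
        | some u =>
          simp [hf] at h
          have := ih hf
          subst h; simp at this ⊢; omega

-- Source B's outer `while` loop
def reduceLoop (l : List Char) : List Char :=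
  match h : findPair l with
  | none => l
  | some t => reduceLoop t
termination_by l.length
decreasing_by have := findPair_length h; omega

def solution_alt (s : String) : Int :=
  if reduceLoop s.toList = [] then 1 else 0

-- ===== PRECONDITION & SPEC =====
def Spec_solution (s : String) (out : Int) : Prop := out = solution_alt s
instance (s : String) (out : Int) : Decidable (Spec_solution s out) := by unfold Spec_solution; infer_instance

-- ===== CLAIM (what is proved, stated in full; the proofs are below) =====
def Claim_equal_solution : Prop := ∀ (s : String), Dom_solution s → Spec_solution s (solution s)

-- ===== LEMMAS AND PROOFS =====

-- head-at-top mirror of A's stack step; stepA works at the list's end, stepR at the head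
def stepR (r : List Char) (w : Char) : List Char :=
  match r with
  | [] => [w]
  | t :: rest => if t = w then rest else w :: t :: rest

theorem stepA_eq_stepR (st : List Char) (w : Char) :
    stepA st w = (stepR st.reverse w).reverse := by
  cases h : st.reverse with
  | nil =>
    have : st = [] := by simpa using congrArg List.reverse h
    subst this; simp [stepA, stepR]
  | cons t rest =>
    have hst : st = rest.reverse ++ [t] := by
      have := congrArg List.reverse h; simpa using this
    subst hst
    simp only [stepA, stepR]
    by_cases hw : t = w <;> simp [hw]

theorem foldA_eq_foldR (l : List Char) (st : List Char) :
    l.foldl stepA st = (l.foldl stepR st.reverse).reverse := by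
  induction l generalizing st with
  | nil => simp
  | cons a l ih =>
    simp only [List.foldl_cons]
    rw [ih, stepA_eq_stepR]
    simp

-- invariant: the stack never holds two equal adjacent elements
theorem chain_stepR {r : List Char} (h : r.IsChain (· ≠ ·)) (w : Char) :
    (stepR r w).IsChain (· ≠ ·) := by
  cases r with
  | nil => simp [stepR]
  | cons t rest =>
    simp only [stepR]
    by_cases hw : t = w
    · rw [hw, if_pos rfl]
      exact (List.isChain_cons.mp h).2
    · rw [if_neg hw]
      exact List.isChain_cons_cons.mpr ⟨fun hh => hw hh.symm, h⟩

theorem chain_foldR {r : List Char} (h : r.IsChain (· ≠ ·)) (l : List Char) :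
    (l.foldl stepR r).IsChain (· ≠ ·) := by
  induction l generalizing r with
  | nil => simpa
  | cons a l ih => exact ih (chain_stepR h a)

-- feeding two equal chars into a chain-free stack is a no-op
theorem foldR_cc {r : List Char} (h : r.IsChain (· ≠ ·)) (c : Char) :
    [c, c].foldl stepR r = r := by
  cases r with
  | nil => simp [stepR]
  | cons t rest =>
    by_cases hc : t = c
    · subst hc
      cases rest with
      | nil => simp [stepR]
      | cons u rest' =>
        have hu : t ≠ u := (List.isChain_cons_cons.mp h).1
        have hu' : u ≠ t := fun hh => hu hh.symm
        simp [stepR, hu']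
    · simp [stepR, hc]

-- splicing out an adjacent equal pair does not change the stack result
theorem foldR_splice (u : List Char) (c : Char) (v : List Char) :
    (u ++ c :: c :: v).foldl stepR [] = (u ++ v).foldl stepR [] := by
  have h : (u.foldl stepR []).IsChain (· ≠ ·) := chain_foldR (by simp) u
  have : (c :: c :: v).foldl stepR (u.foldl stepR []) =
      v.foldl stepR (u.foldl stepR []) := by
    show ([c, c] ++ v).foldl stepR (u.foldl stepR []) = _
    rw [List.foldl_append, foldR_cc h]
  simpa [List.foldl_append] using this

-- a successful scan is exactly the splice of the first adjacent equal pair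
theorem findPair_spec : ∀ {l t : List Char}, findPair l = some t →
    ∃ u c v, l = u ++ c :: c :: v ∧ t = u ++ v := by
  intro l
  induction l with
  | nil => intro t h; simp [findPair] at h
  | cons a l ih =>
    intro t h
    match l, h with
    | [], h => simp [findPair] at h
    | b :: t', h =>
      simp only [findPair] at h
      split at h
      · rename_i hab
        refine ⟨[], a, t', by simp [hab], by simpa using h.symm⟩
      · cases hf : findPair (b :: t') with
        | none => simp [hf] at h
        | some u =>
          simp [hf] at h
          obtain ⟨u', c, v, h1, h2⟩ := ih hf
          exact ⟨a :: u', c, v, by simp [h1], by simp [← h, h2]⟩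

-- a string with no adjacent equal pair is already fully reduced (stack = its reverse)
theorem foldR_noPair : ∀ (t : List Char) (r : List Char),
    findPair t = none →
    (∀ h a, r.head? = some h → t.head? = some a → h ≠ a) →
    t.foldl stepR r = t.reverse ++ r := by
  intro t
  induction t with
  | nil => intro r _ _; simp
  | cons a t' ih =>
    intro r hnp hhd
    have hstep : stepR r a = a :: r := by
      cases r with
      | nil => simp [stepR]
      | cons h rest =>
        have := hhd h a rfl rfl
        simp [stepR, this]
    have hnp' : findPair t' = none := by
      cases t' with
      | nil => simp [findPair]
      | cons b t'' =>
        simp only [findPair] at hnp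
        split at hnp
        · simp at hnp
        · cases hf : findPair (b :: t'') with
          | none => rfl
          | some u => simp [hf] at hnp
    have hhd' : ∀ h x, (a :: r).head? = some h → t'.head? = some x → h ≠ x := by
      intro h x hh hx
      cases t' with
      | nil => simp at hx
      | cons b t'' =>
        simp at hh hx
        subst hh; subst hx
        simp only [findPair] at hnp
        split at hnp
        · simp at hnp
        · assumption
    simp only [List.foldl_cons, hstep]
    rw [ih (a :: r) hnp' hhd']
    simp

theorem findPair_reduceLoop (l : List Char) : findPair (reduceLoop l) = none := by
  induction l using reduceLoop.induct with
  | case1 l h => rw [reduceLoop]; split <;> simp_all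
  | case2 l t h ih => rw [reduceLoop]; split <;> simp_all

theorem foldR_reduceLoop (l : List Char) :
    l.foldl stepR [] = (reduceLoop l).foldl stepR [] := by
  induction l using reduceLoop.induct with
  | case1 l h => rw [reduceLoop]; split <;> simp_all
  | case2 l t h ih =>
    rw [reduceLoop]
    split
    · rename_i heq; rw [h] at heq
    · rename_i t' heq
      rw [h] at heq
      injection heq with heq'; subst heq'
      rw [← ih]
      obtain ⟨u, c, v, h1, h2⟩ := findPair_spec h
      rw [h1, h2, foldR_splice]

theorem stack_empty_iff (l : List Char) :
    l.foldl stepR [] = [] ↔ reduceLoop l = [] := by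
  rw [foldR_reduceLoop]
  have hred := foldR_noPair (reduceLoop l) [] (findPair_reduceLoop l) (by simp)
  rw [hred]
  simp

-- ===== VERDICT (by name: the statement is the Claim_ definition above) =====
theorem solution_spec : Claim_equal_solution := by
  intro s _
  unfold Spec_solution solution solution_alt
  rw [foldA_eq_foldR]
  simp only [List.reverse_nil, List.reverse_eq_nil_iff, stack_empty_iff]
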